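-- pv_equiv track=rewrite | github.com/BadScientist/My-Portfolio | Xiangxi/XiangqiGame.py | pos_coords
-- ===== SOURCE A (Python) =====
-- def pos_coords(position):
--     """Returns a position on a XiangqiGame board as [x, y] coordinates."""
--     coords = []
--     x_coord = 1
--
--     # Iterates through the list of files on a Xiangqi game board and appends the
--     # numerical value of the given position's file to coords.
--     for letter in "abcdefghi":
--
--         if letter == position[0]:
--             coords.append(x_coord)
--
--         else:
--             x_coord += 1
--
--     # The rank is cast to int and appended since it's already numerical.
--     coords.append(int(position[1: len(position) + 1]))
--
--     return coords
-- ===== SOURCE B (Python) =====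
-- def pos_coords(position):
--     """Returns a position on a XiangqiGame board as [x, y] coordinates."""
--     coords = []
--     file = position[0]
--     # Closed-form file index instead of scanning the file letters:
--     if 'a' <= file <= 'i':
--         coords.append(ord(file) - ord('a') + 1)
--     coords.append(int(position[1:]))
--     return coords
-- ===== Notes on version B (the rewrite author's own statement) =====
-- stated objective: simpler
-- what changed: The scan over the nine file letters with a running counter is replaced by a constant-time arithmetic formula ord(file)-ord('a')+1 guarded by a range test; the rank conversion is unchanged.
-- outside the precondition, e.g. on pos_coords(''): A raises IndexError, B raises IndexError; on pos_coords('a'): A raises ValueError, B raises ValueError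
import Mathlib
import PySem

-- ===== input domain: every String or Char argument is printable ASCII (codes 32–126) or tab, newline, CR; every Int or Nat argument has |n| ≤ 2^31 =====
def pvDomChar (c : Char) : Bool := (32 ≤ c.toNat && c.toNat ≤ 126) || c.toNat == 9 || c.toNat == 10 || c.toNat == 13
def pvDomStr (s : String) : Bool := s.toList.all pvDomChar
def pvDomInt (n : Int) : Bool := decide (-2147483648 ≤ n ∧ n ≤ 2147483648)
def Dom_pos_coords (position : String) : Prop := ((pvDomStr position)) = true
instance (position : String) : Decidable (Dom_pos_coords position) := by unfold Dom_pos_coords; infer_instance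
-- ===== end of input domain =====

-- B replaces the scan over the nine file letters by a constant-time arithmetic formula with a range guard.

-- ===== PORT A =====
-- fold carries (coords, x_coord); position[0] is read each iteration, as in A
def pos_coords (position : String) : List Int :=
  let st := ("abcdefghi".toList).foldl
    (fun (st : List Int × Int) letter =>
      if PySem.Str.pyGet? position 0 = some letter then (st.1 ++ [st.2], st.2)
      else (st.1, st.2 + 1)) ([], 1)
  match PySem.Int.ofStr? (PySem.Str.slice position (some 1) (some (PySem.Str.len position + 1))) with
  | some n => st.1 ++ [n]
  | none => st.1   -- int() raised ValueError; excluded by Pre_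

-- ===== PORT B =====
def pos_coords_alt (position : String) : List Int :=
  let head :=
    match PySem.Str.pyGet? position 0 with
    | some c => if 'a' ≤ c ∧ c ≤ 'i' then [((c.toNat : Int) - 97 + 1)] else []
    | none => []   -- IndexError; excluded by Pre_
  match PySem.Int.ofStr? (PySem.Str.slice position (some 1) none) with
  | some n => head ++ [n]
  | none => head   -- ValueError; excluded by Pre_

-- ===== PRECONDITION & SPEC =====
-- A raises IndexError on "" (position[0]) and ValueError when position[1:] is not int-like; exactly those are excluded.
def Pre_pos_coords (position : String) : Prop :=
  position ≠ "" ∧ (PySem.Int.ofStr? (PySem.Str.slice position (some 1) none)).isSome = true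
instance (position : String) : Decidable (Pre_pos_coords position) := by unfold Pre_pos_coords; infer_instance
def pvWitness_pos_coords : String := "e5"

def Spec_pos_coords (position : String) (out : List Int) : Prop := out = pos_coords_alt position
instance (position : String) (out : List Int) : Decidable (Spec_pos_coords position out) := by unfold Spec_pos_coords; infer_instance

-- ===== CLAIM (what is proved, stated in full; the proofs are below) =====
def Claim_equal_pos_coords : Prop := ∀ (position : String), Dom_pos_coords position → Pre_pos_coords position → Spec_pos_coords position (pos_coords position)

-- ===== LEMMAS AND PROOFS =====
theorem chEq (c d : Char) (h : c.toNat = d.toNat) : c = d := Char.ext (UInt32.toNat_inj.mp h)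

theorem head_fold (c : Char) :
    (("abcdefghi".toList).foldl
      (fun (st : List Int × Int) letter =>
        if some c = some letter then (st.1 ++ [st.2], st.2)
        else (st.1, st.2 + 1)) ([], 1)).1
    = (if 'a' ≤ c ∧ c ≤ 'i' then [((c.toNat : Int) - 97 + 1)] else []) := by
  by_cases h1 : c = 'a'; · subst h1; decide
  by_cases h2 : c = 'b'; · subst h2; decide
  by_cases h3 : c = 'c'; · subst h3; decide
  by_cases h4 : c = 'd'; · subst h4; decide
  by_cases h5 : c = 'e'; · subst h5; decide
  by_cases h6 : c = 'f'; · subst h6; decide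
  by_cases h7 : c = 'g'; · subst h7; decide
  by_cases h8 : c = 'h'; · subst h8; decide
  by_cases h9 : c = 'i'; · subst h9; decide
  have hr : ¬ ('a' ≤ c ∧ c ≤ 'i') := by
    rintro ⟨hl, hu⟩
    have l1 : 97 ≤ c.toNat := Nat.succ_le_of_lt hl
    have l2 : c.toNat ≤ 105 := Fin.mk_le_mk.mp hu
    have m1 : c.toNat ≠ 97 := fun h => h1 (chEq c 'a' h)
    have m2 : c.toNat ≠ 98 := fun h => h2 (chEq c 'b' h)
    have m3 : c.toNat ≠ 99 := fun h => h3 (chEq c 'c' h)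
    have m4 : c.toNat ≠ 100 := fun h => h4 (chEq c 'd' h)
    have m5 : c.toNat ≠ 101 := fun h => h5 (chEq c 'e' h)
    have m6 : c.toNat ≠ 102 := fun h => h6 (chEq c 'f' h)
    have m7 : c.toNat ≠ 103 := fun h => h7 (chEq c 'g' h)
    have m8 : c.toNat ≠ 104 := fun h => h8 (chEq c 'h' h)
    have m9 : c.toNat ≠ 105 := fun h => h9 (chEq c 'i' h)
    omega
  simp [List.foldl, h1, h2, h3, h4, h5, h6, h7, h8, h9, hr]

-- the two slice bounds [1 : len+1] and [1 : ] give the same tail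
theorem slice_tail (position : String) :
    PySem.Str.slice position (some 1) (some (PySem.Str.len position + 1))
      = PySem.Str.slice position (some 1) none := by
  apply String.ext
  simp only [PySem.Str.toList_slice, PySem.Chars.slice_eq_listSlice, PySem.Str.len_eq]
  rw [PySem.List.slice_toNat _ (by omega) (by omega), PySem.List.slice_from_one]
  have h : (((position.toList.length : Int)) + 1).toNat - Int.toNat 1 = position.toList.length := by omega
  rw [h, List.take_of_length_le (by simp)]; norm_num [List.drop_one]

-- ===== VERDICT (by name: the statement is the Claim_ definition above) =====
theorem pos_coords_spec : Claim_equal_pos_coords := by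
  intro position _ hPre
  obtain ⟨hne, hint⟩ := hPre
  unfold Spec_pos_coords pos_coords pos_coords_alt
  cases hL : position.toList with
  | nil => exact absurd (String.ext hL) hne
  | cons c cs =>
    have h0 : PySem.Str.pyGet? position 0 = some c := by
      simp [hL]
    rw [slice_tail, h0]
    cases hI : PySem.Int.ofStr? (PySem.Str.slice position (some 1) none) with
    | none => rw [hI] at hint; simp at hint
    | some n =>
      simp only [head_fold c]
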